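-- pv_equiv track=rewrite | github.com/ahirsharan/LocalTextSearch | pygrep.py | newlines_index
-- ===== SOURCE A (Python) =====
-- def newlines_index(text):
--     newlines_list = [0]
--     index = 1
--
--     for char in text:
--         if char == '\n':
--             newlines_list.append(index)
--
--         index += 1
--
--     return newlines_list
-- ===== SOURCE B (Python) =====
-- def newlines_index(text):
--     parts = text.split('\n')
--     result = [0]
--     off = 0
--     for part in parts[:-1]:
--         off += len(part) + 1
--         result.append(off)
--     return result
-- ===== Notes on version B (the rewrite author's own statement) =====
-- stated objective: faster
-- what changed: B splits the text into lines once with str.split and prefix-sums the segment lengths, replacing A's per-character Python loop with a running index.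
import Mathlib
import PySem

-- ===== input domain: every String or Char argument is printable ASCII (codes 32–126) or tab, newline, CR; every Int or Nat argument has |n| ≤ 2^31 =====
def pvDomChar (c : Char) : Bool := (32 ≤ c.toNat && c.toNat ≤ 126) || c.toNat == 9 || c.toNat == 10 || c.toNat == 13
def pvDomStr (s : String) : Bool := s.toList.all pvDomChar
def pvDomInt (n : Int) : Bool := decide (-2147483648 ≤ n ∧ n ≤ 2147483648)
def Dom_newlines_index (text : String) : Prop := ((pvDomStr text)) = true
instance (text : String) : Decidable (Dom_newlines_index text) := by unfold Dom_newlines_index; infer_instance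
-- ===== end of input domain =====

-- B splits the text on '\n' once and prefix-sums segment lengths, instead of A's per-character scan with a running index; return values proved equal.

-- ===== PORT A =====
def newlines_index (text : String) : List Int :=
  (text.toList.foldl
    (fun (st : List Int × Int) c =>
      ((if c = '\n' then st.1 ++ [st.2] else st.1), st.2 + 1))
    ([0], 1)).1

-- ===== PORT B =====
def newlines_index_alt (text : String) : List Int :=
  let parts := PySem.Chars.splitOn text.toList ['\n']
  ((PySem.List.slice parts none (some (-1))).foldl
    (fun (st : List Int × Int) part =>
      (st.1 ++ [st.2 + (part.length : Int) + 1], st.2 + (part.length : Int) + 1))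
    ([0], 0)).1

-- ===== PRECONDITION & SPEC =====
def Spec_newlines_index (text : String) (out : List Int) : Prop := out = newlines_index_alt text
instance (text : String) (out : List Int) : Decidable (Spec_newlines_index text out) := by unfold Spec_newlines_index; infer_instance

-- ===== CLAIM (what is proved, stated in full; the proofs are below) =====
def Claim_equal_newlines_index : Prop := ∀ (text : String), Dom_newlines_index text → Spec_newlines_index text (newlines_index text)

-- ===== LEMMAS AND PROOFS =====

-- positions (1-based running index) just after each newline of cs, starting at idx
def pvG : List Char → Int → List Int
  | [], _ => []
  | c :: cs, idx => if c = '\n' then idx :: pvG cs (idx + 1) else pvG cs (idx + 1)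

theorem pvA_fold (cs : List Char) (res : List Int) (idx : Int) :
    (cs.foldl (fun (st : List Int × Int) c =>
      ((if c = '\n' then st.1 ++ [st.2] else st.1), st.2 + 1)) (res, idx)).1
      = res ++ pvG cs idx := by
  induction cs generalizing res idx with
  | nil => simp [pvG]
  | cons c cs ih =>
    by_cases h : c = '\n' <;> simp [pvG, h, ih]

theorem pvG_no (p : List Char) (h : '\n' ∉ p) (idx : Int) : pvG p idx = [] := by
  induction p generalizing idx with
  | nil => rfl
  | cons c cs ih =>
    simp only [List.mem_cons, not_or] at h
    simp [pvG, Ne.symm h.1, ih h.2]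

theorem pvG_append (p : List Char) (h : '\n' ∉ p) (cs : List Char) (idx : Int) :
    pvG (p ++ cs) idx = pvG cs (idx + p.length) := by
  induction p generalizing idx with
  | nil => simp
  | cons c q ih =>
    simp only [List.mem_cons, not_or] at h
    simp only [List.cons_append, pvG, if_neg (Ne.symm h.1), ih h.2]
    congr 1
    simp only [List.length_cons]
    push_cast
    ring

theorem pv_go_eq (fuel : Nat) (l cur : List Char) (acc : List (List Char))
    (hf : l.length ≤ fuel) :
    PySem.Chars.splitOn.go ['\n'] (fuel + 1) l cur acc
      = acc.reverse ++ (List.splitOnP (fun c => c == '\n') l).modifyHead (cur.reverse ++ ·) := by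
  induction fuel generalizing l cur acc with
  | zero =>
    have hl : l = [] := List.eq_nil_of_length_eq_zero (Nat.le_zero.mp hf)
    subst hl
    simp [PySem.Chars.splitOn.go, List.splitOnP_nil]
  | succ f ih =>
    cases l with
    | nil => simp [PySem.Chars.splitOn.go, List.splitOnP_nil]
    | cons c rest =>
      simp only [List.length_cons, Nat.add_le_add_iff_right] at hf
      by_cases h : c = '\n'
      · subst h
        rw [show PySem.Chars.splitOn.go ['\n'] (f + 1 + 1) ('\n' :: rest) cur acc
              = PySem.Chars.splitOn.go ['\n'] (f + 1) rest [] (cur.reverse :: acc) by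
            simp [PySem.Chars.splitOn.go, List.isPrefixOf]]
        rw [ih rest [] (cur.reverse :: acc) hf]
        rw [List.splitOnP_cons]
        simp only [beq_self_eq_true, if_true, List.reverse_cons, List.reverse_nil,
          List.nil_append, List.modifyHead_cons, List.append_assoc, List.cons_append,
          List.nil_append, List.append_nil]
        rcases hsp : List.splitOnP (fun c => c == '\n') rest with _ | ⟨p, ps⟩
        · exact absurd hsp (List.splitOnP_ne_nil _ _)
        · simp
      · rw [show PySem.Chars.splitOn.go ['\n'] (f + 1 + 1) (c :: rest) cur acc
              = PySem.Chars.splitOn.go ['\n'] (f + 1) rest (c :: cur) acc by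
            have hcond : List.isPrefixOf ['\n'] (c :: rest) = false := by
              simp only [List.isPrefixOf, Bool.and_eq_false_iff, beq_eq_false_iff_ne, ne_eq]
              exact Or.inl fun h' => h h'.symm
            simp [PySem.Chars.splitOn.go, hcond]]
        rw [ih rest (c :: cur) acc hf]
        rw [List.splitOnP_cons]
        simp only [h, beq_iff_eq, if_neg h]
        rcases hsp : List.splitOnP (fun c => c == '\n') rest with _ | ⟨p, ps⟩
        · exact absurd hsp (List.splitOnP_ne_nil _ _)
        · simp

theorem pv_splitOn_newline (cs : List Char) :
    PySem.Chars.splitOn cs ['\n'] = List.splitOnP (fun c => c == '\n') cs := by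
  unfold PySem.Chars.splitOn
  rw [pv_go_eq cs.length cs [] [] (le_refl _)]
  rcases hsp : List.splitOnP (fun c => c == '\n') cs with _ | ⟨p, ps⟩
  · exact absurd hsp (List.splitOnP_ne_nil _ _)
  · simp

theorem pv_parts_no_newline (cs : List Char) :
    ∀ q ∈ List.splitOnP (fun c => c == '\n') cs, '\n' ∉ q := by
  induction cs with
  | nil => simp [List.splitOnP_nil]
  | cons c rest ih =>
    rw [List.splitOnP_cons]
    by_cases h : c = '\n'
    · simp only [h, beq_self_eq_true, if_pos rfl]
      intro q hq
      rcases List.mem_cons.mp hq with h1 | h1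
      · simp [h1]
      · exact ih q h1
    · simp only [beq_iff_eq, if_neg h]
      rcases hsp : List.splitOnP (fun c => c == '\n') rest with _ | ⟨p, ps⟩
      · exact absurd hsp (List.splitOnP_ne_nil _ _)
      · intro q hq
        rcases List.mem_cons.mp hq with h1 | h1
        · subst h1
          have hp := ih p (by rw [hsp]; exact List.mem_cons_self)
          simp [Ne.symm h, hp]
        · exact ih q (by rw [hsp]; exact List.mem_cons_of_mem _ h1)

theorem pv_slice_dropLast {α : Type} (l : List α) :
    PySem.List.slice l none (some (-1)) = l.dropLast := by
  show List.take (PySem.List.clampIdx l.length (-1) - 0) (List.drop 0 l) = l.dropLast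
  rw [List.drop_zero, Nat.sub_zero, List.dropLast_eq_take]
  congr 1
  simp only [PySem.List.clampIdx]
  split_ifs <;> omega

theorem pv_fold_parts (parts : List (List Char)) (hne : parts ≠ [])
    (hno : ∀ q ∈ parts, '\n' ∉ q) (res : List Int) (off : Int) :
    ((parts.dropLast).foldl (fun (st : List Int × Int) part =>
        (st.1 ++ [st.2 + (part.length : Int) + 1], st.2 + (part.length : Int) + 1)) (res, off)).1
      = res ++ pvG (List.intercalate ['\n'] parts) (off + 1) := by
  induction parts generalizing res off with
  | nil => exact absurd rfl hne
  | cons p ps ih =>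
    cases ps with
    | nil =>
      simp [List.intercalate, pvG_no p (hno p List.mem_cons_self)]
    | cons q qs =>
      have hno' : ∀ r ∈ q :: qs, '\n' ∉ r := fun r hr => hno r (List.mem_cons_of_mem _ hr)
      simp only [List.dropLast_cons₂, List.foldl_cons]
      rw [ih (by simp) hno' (res ++ [off + (p.length : Int) + 1]) (off + (p.length : Int) + 1)]
      rw [show List.intercalate ['\n'] (p :: q :: qs)
            = p ++ ['\n'] ++ List.intercalate ['\n'] (q :: qs) by
          simp [List.intercalate, List.intersperse]]
      rw [show p ++ ['\n'] ++ List.intercalate ['\n'] (q :: qs)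
            = p ++ ('\n' :: List.intercalate ['\n'] (q :: qs)) by simp]
      rw [pvG_append p (hno p List.mem_cons_self)]
      simp only [List.singleton_append, pvG, if_pos rfl, List.append_assoc]
      congr 2
      · ring
      · congr 1
        ring

-- ===== VERDICT (by name: the statement is the Claim_ definition above) =====
theorem newlines_index_spec : Claim_equal_newlines_index := by
  intro text _
  unfold Spec_newlines_index newlines_index newlines_index_alt
  rw [pvA_fold]
  simp only [pv_splitOn_newline, pv_slice_dropLast]
  rw [pv_fold_parts _ (List.splitOnP_ne_nil _ _) (pv_parts_no_newline _) [0] 0]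
  have h : List.intercalate ['\n'] (List.splitOnP (fun c => c == '\n') text.toList) = text.toList := by
    exact List.intercalate_splitOn text.toList '\n'
  rw [h]
  norm_num
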